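-- pv_equiv track=rewrite | github.com/MK-YR/HackerRank-Task-Archive | Mathematics/Number List.py | solve
-- ===== SOURCE A (Python) =====
-- def solve(a, k):
--     n = len(a)
--     total_subarrays = n * (n + 1) // 2
--     count_leq_k = 0
--     current_len = 0
--     for x in a:
--         if x <= k:
--             current_len += 1
--         else:
--             count_leq_k += current_len * (current_len + 1) // 2
--             current_len = 0
--     count_leq_k += current_len * (current_len + 1) // 2 #Add last segment if it ends with <= k
--     return total_subarrays - count_leq_k #Subarrays with maximum > k
-- ===== SOURCE B (Python) =====
-- def solve(a, k):
--     last_bad = -1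
--     count = 0
--     for j, x in enumerate(a):
--         if x > k:
--             last_bad = j
--         count += last_bad + 1
--     return count
-- ===== Notes on version B (the rewrite author's own statement) =====
-- stated objective: simpler
-- what changed: B counts the qualifying subarrays directly in one pass by tracking the index of the last element exceeding k (adding last_bad+1 valid left endpoints per right endpoint), instead of A's complement count via triangular-number formulas over maximal runs of elements <= k subtracted from the total.
import Mathlib
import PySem

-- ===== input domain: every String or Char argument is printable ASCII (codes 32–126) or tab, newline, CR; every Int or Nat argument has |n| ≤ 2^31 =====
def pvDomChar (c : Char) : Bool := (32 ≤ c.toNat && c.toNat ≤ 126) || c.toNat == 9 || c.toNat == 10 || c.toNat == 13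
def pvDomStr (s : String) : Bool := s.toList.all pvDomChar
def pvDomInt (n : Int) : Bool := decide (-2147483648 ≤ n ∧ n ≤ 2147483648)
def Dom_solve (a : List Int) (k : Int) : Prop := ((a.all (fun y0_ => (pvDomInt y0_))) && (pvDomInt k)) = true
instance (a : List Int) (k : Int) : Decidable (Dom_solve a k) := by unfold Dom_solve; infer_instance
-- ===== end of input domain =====

-- B counts the qualifying subarrays directly in one pass (last-bad-index), instead of A's
-- complement count via triangular formulas over runs of small elements; objective: simpler.

-- ===== PORT A =====
-- A's loop body: extend the current run of elements ≤ k, or close it, adding its subarray count.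
def solveStepA (k : Int) (st : Int × Int) (x : Int) : Int × Int :=
  if x ≤ k then (st.1, st.2 + 1)
  else (st.1 + PySem.Int.floordiv (st.2 * (st.2 + 1)) 2, 0)

def solve (a : List Int) (k : Int) : Int :=
  let n : Int := a.length
  let total_subarrays := PySem.Int.floordiv (n * (n + 1)) 2
  let st := a.foldl (solveStepA k) (0, 0)   -- st = (count_leq_k, current_len)
  let count_leq_k := st.1 + PySem.Int.floordiv (st.2 * (st.2 + 1)) 2
  total_subarrays - count_leq_k

-- ===== PORT B =====
-- B's loop body over enumerate: update the last bad index, add last_bad + 1 to the count.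
def solveStepB (k : Int) (st : Int × Int) (p : Int × Int) : Int × Int :=
  let lb := if p.2 > k then p.1 else st.1
  (lb, st.2 + lb + 1)

def solve_alt (a : List Int) (k : Int) : Int :=
  ((PySem.List.enumerate a 0).foldl (solveStepB k) (-1, 0)).2

-- ===== PRECONDITION & SPEC =====
def Spec_solve (a : List Int) (k : Int) (out : Int) : Prop := out = solve_alt a k
instance (a : List Int) (k : Int) (out : Int) : Decidable (Spec_solve a k out) := by unfold Spec_solve; infer_instance

-- ===== CLAIM (what is proved, stated in full; the proofs are below) =====
def Claim_equal_solve : Prop := ∀ (a : List Int) (k : Int), Dom_solve a k → Spec_solve a k (solve a k)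

-- ===== LEMMAS AND PROOFS =====

-- triangular number x*(x+1)//2 (the quantity both programs divide by 2)
def tri (x : Int) : Int := PySem.Int.floordiv (x * (x + 1)) 2

lemma tri_succ (x : Int) : tri (x + 1) = tri x + (x + 1) := by
  obtain ⟨r, hr⟩ := Int.even_mul_succ_self x
  obtain ⟨s, hs⟩ := Int.even_mul_succ_self (x + 1)
  have h3 : (x + 1) * ((x + 1) + 1) = x * (x + 1) + 2 * (x + 1) := by ring
  unfold tri
  rw [PySem.Int.floordiv_eq_ediv_of_pos (by norm_num), PySem.Int.floordiv_eq_ediv_of_pos (by norm_num),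
      hr, hs]
  omega

lemma loop_inv (k : Int) : ∀ (l : List Int) (m c r lb cnt : Int),
    lb = m - 1 - r → cnt = tri m - c - tri r →
    ((PySem.List.enumerate l m).foldl (solveStepB k) (lb, cnt)).2 =
      tri (m + l.length) - (l.foldl (solveStepA k) (c, r)).1 -
        tri (l.foldl (solveStepA k) (c, r)).2 := by
  intro l
  induction l with
  | nil =>
    intro m c r lb cnt hlb hcnt
    simp [PySem.List.enumerate, hcnt]
  | cons x l ih =>
    intro m c r lb cnt hlb hcnt
    rw [PySem.List.enumerate_cons]
    by_cases h : x ≤ k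
    · have hB : solveStepB k (lb, cnt) (m, x) = (lb, cnt + lb + 1) := by
        simp [solveStepB, not_lt.mpr h]
      have hA : solveStepA k (c, r) x = (c, r + 1) := by
        simp [solveStepA, h]
      rw [List.foldl_cons, List.foldl_cons, hB, hA,
          ih (m + 1) c (r + 1) lb (cnt + lb + 1)
            (by omega)
            (by rw [tri_succ m, tri_succ r]; omega)]
      have : m + 1 + (l.length : Int) = m + ((x :: l).length : Int) := by
        simp; omega
      rw [this]
    · have hB : solveStepB k (lb, cnt) (m, x) = (m, cnt + m + 1) := by
        simp [solveStepB, lt_of_not_ge h]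
      have hA : solveStepA k (c, r) x = (c + tri r, 0) := by
        simp [solveStepA, h, tri]
      rw [List.foldl_cons, List.foldl_cons, hB, hA,
          ih (m + 1) (c + tri r) 0 m (cnt + m + 1)
            (by omega)
            (by rw [tri_succ m]; have h0 : tri 0 = 0 := by decide
                omega)]
      have : m + 1 + (l.length : Int) = m + ((x :: l).length : Int) := by
        simp; omega
      rw [this]

-- ===== VERDICT (by name: the statement is the Claim_ definition above) =====
theorem solve_spec : Claim_equal_solve := by
  intro a k _
  unfold Spec_solve solve solve_alt
  have h := loop_inv k a 0 0 0 (-1) 0 (by ring) (by simp [tri, PySem.Int.floordiv])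
  rw [zero_add] at h
  rw [h]
  simp only [tri]
  rw [PySem.Int.floordiv_eq_ediv_of_pos (by norm_num : (0:Int) < 2), PySem.Int.floordiv_eq_ediv_of_pos (by norm_num : (0:Int) < 2)]
  omega
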